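-- pv_equiv track=rewrite | github.com/apple/turicreate | src/python/turicreate/test/test_distances.py | squared_euclidean
-- ===== SOURCE A (Python) =====
-- def squared_euclidean(a, b):
--     a2 = a.copy()
--     b2 = b.copy()
--
--     ans = 0
--     keys = set(a.keys()).union(set(b.keys()))
--     for k in keys:
--         a2.setdefault(k, 0)
--         b2.setdefault(k, 0)
--         ans += (a2[k] - b2[k]) ** 2
--     return ans
-- ===== SOURCE B (Python) =====
-- def squared_euclidean(a, b):
--     # ||a - b||^2 = ||a||^2 + ||b||^2 - 2<a, b>: three aggregate sums, no per-key differences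
--     dot = sum(va * b[k] for k, va in a.items() if k in b)
--     return sum(v * v for v in a.values()) + sum(v * v for v in b.values()) - 2 * dot
-- ===== Notes on version B (the rewrite author's own statement) =====
-- stated objective: alternative
-- what changed: Replaces A's per-key loop of squared differences over an explicit union key set (with dict copies and setdefault padding) by the algebraic identity ||a-b||^2 = ||a||^2 + ||b||^2 - 2<a,b>: three independent aggregate sums (two sums of squared values, one dot product over the common keys), exact on integers.
import Mathlib
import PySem

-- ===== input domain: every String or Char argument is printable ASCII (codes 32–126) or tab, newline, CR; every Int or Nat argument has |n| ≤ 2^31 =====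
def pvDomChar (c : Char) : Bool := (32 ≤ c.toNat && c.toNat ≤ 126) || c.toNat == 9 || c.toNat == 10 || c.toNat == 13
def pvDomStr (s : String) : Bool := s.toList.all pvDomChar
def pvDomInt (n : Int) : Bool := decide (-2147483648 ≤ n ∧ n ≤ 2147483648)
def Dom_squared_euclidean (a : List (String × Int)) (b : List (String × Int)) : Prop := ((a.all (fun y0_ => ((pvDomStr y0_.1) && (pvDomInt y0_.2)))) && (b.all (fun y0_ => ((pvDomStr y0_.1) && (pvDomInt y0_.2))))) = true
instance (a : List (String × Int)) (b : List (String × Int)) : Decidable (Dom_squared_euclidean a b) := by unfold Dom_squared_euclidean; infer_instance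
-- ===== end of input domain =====

-- B replaces A's per-key loop of squared differences over a union key set by the algebraic
-- identity ||a-b||^2 = ||a||^2 + ||b||^2 - 2<a,b>: three aggregate sums, exact on integers.

-- ===== PORT A =====
def squared_euclidean (a : List (String × Int)) (b : List (String × Int)) : Int :=
  let a2 := PySem.Dict.mk a
  let b2 := PySem.Dict.mk b
  let keys : PySem.Set String :=
    PySem.Set.union (PySem.Set.ofList a2.keys) (PySem.Set.ofList b2.keys)
  let r := keys.foldl
    (fun (st : PySem.Dict String Int × PySem.Dict String Int × Int) k =>
      let a2' := st.1.setdefault k 0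
      let b2' := st.2.1.setdefault k 0
      (a2', b2', st.2.2 + (a2'.getD k 0 - b2'.getD k 0) ^ 2))
    (a2, b2, 0)
  r.2.2

-- ===== PORT B =====
-- b[k] is evaluated only under the 'k in b' guard, so bd.getD p.1 0 is exact there.
def squared_euclidean_alt (a : List (String × Int)) (b : List (String × Int)) : Int :=
  let ad := PySem.Dict.mk a
  let bd := PySem.Dict.mk b
  let dot := ad.items.foldl
    (fun s p => if bd.contains p.1 then s + p.2 * bd.getD p.1 0 else s) 0
  let sa := ad.values.foldl (fun s v => s + v * v) 0
  let sb := bd.values.foldl (fun s v => s + v * v) 0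
  sa + sb - 2 * dot

-- ===== PRECONDITION & SPEC =====
-- Pre_ only requires the association lists to have pairwise-distinct keys: a Python dict
-- always satisfies this, so no input A (which is total on dicts) returns on is excluded.
def Pre_squared_euclidean (a : List (String × Int)) (b : List (String × Int)) : Prop :=
  (a.map Prod.fst).Nodup ∧ (b.map Prod.fst).Nodup
instance (a : List (String × Int)) (b : List (String × Int)) : Decidable (Pre_squared_euclidean a b) := by unfold Pre_squared_euclidean; infer_instance

def pvWitness_squared_euclidean : (List (String × Int)) × (List (String × Int)) :=
  ([("x", 1), ("y", -2)], [("y", 3), ("z", 4)])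

def Spec_squared_euclidean (a : List (String × Int)) (b : List (String × Int)) (out : Int) : Prop := out = squared_euclidean_alt a b
instance (a : List (String × Int)) (b : List (String × Int)) (out : Int) : Decidable (Spec_squared_euclidean a b out) := by unfold Spec_squared_euclidean; infer_instance

-- ===== CLAIM (what is proved, stated in full; the proofs are below) =====
def Claim_equal_squared_euclidean : Prop := ∀ (a : List (String × Int)) (b : List (String × Int)), Dom_squared_euclidean a b → Pre_squared_euclidean a b → Spec_squared_euclidean a b (squared_euclidean a b)

-- ===== LEMMAS AND PROOFS =====

-- setdefault with default 0 never changes any getD · 0 lookup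
theorem pv_getD0_setdefault (d : PySem.Dict String Int) (k k' : String) :
    (d.setdefault k 0).getD k' 0 = d.getD k' 0 := by
  by_cases h : k' = k
  · subst h; exact PySem.Dict.getD_setdefault_self d k' 0 0
  · rw [PySem.Dict.getD_eq_get?_getD, PySem.Dict.get?_setdefault_of_ne d 0 h,
      ← PySem.Dict.getD_eq_get?_getD]

-- A's loop computes a sum over the key list
theorem pv_loopA (ks : List String) (a2 b2 : PySem.Dict String Int) (acc : Int) :
    (ks.foldl
      (fun (st : PySem.Dict String Int × PySem.Dict String Int × Int) k =>
        let a2' := st.1.setdefault k 0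
        let b2' := st.2.1.setdefault k 0
        (a2', b2', st.2.2 + (a2'.getD k 0 - b2'.getD k 0) ^ 2))
      (a2, b2, acc)).2.2
    = acc + (ks.map (fun k => (a2.getD k 0 - b2.getD k 0) ^ 2)).sum := by
  induction ks generalizing a2 b2 acc with
  | nil => simp
  | cons k ks ih =>
    simp only [List.foldl_cons, List.map_cons, List.sum_cons]
    rw [ih]
    have hmap : ks.map (fun k' => ((a2.setdefault k 0).getD k' 0 - (b2.setdefault k 0).getD k' 0) ^ 2)
        = ks.map (fun k' => (a2.getD k' 0 - b2.getD k' 0) ^ 2) :=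
      List.map_congr_left (fun x _ => by rw [pv_getD0_setdefault, pv_getD0_setdefault])
    rw [hmap, pv_getD0_setdefault, pv_getD0_setdefault]
    ring

-- a guarded accumulating loop is a sum over the filtered list
theorem pv_foldl_if_add {α : Type} (l : List α) (p : α → Bool) (g : α → Int) (acc : Int) :
    (l.foldl (fun s x => if p x then s + g x else s) acc)
    = acc + ((l.filter p).map g).sum := by
  induction l generalizing acc with
  | nil => simp
  | cons x l ih =>
    simp only [List.foldl_cons, List.filter_cons]
    by_cases h : p x
    · simp [h, ih]; ring
    · simp [h, ih]

-- expand the squared difference over a key list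
theorem pv_sum_sq_sub {α : Type} (l : List α) (f g : α → Int) :
    (l.map (fun k => (f k - g k) ^ 2)).sum
    = (l.map (fun k => f k * f k)).sum - 2 * (l.map (fun k => f k * g k)).sum
      + (l.map (fun k => g k * g k)).sum := by
  induction l with
  | nil => simp
  | cons k l ih => simp only [List.map_cons, List.sum_cons, ih]; ring

-- terms that vanish off the filter can be dropped
theorem pv_sum_filter_of_zero {α : Type} (l : List α) (p : α → Bool) (h : α → Int)
    (hz : ∀ x ∈ l, p x = false → h x = 0) :
    (l.map h).sum = ((l.filter p).map h).sum := by
  induction l with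
  | nil => simp
  | cons x l ih =>
    by_cases hp : p x
    · simp [hp, ih (fun y hy => hz y (List.mem_cons_of_mem _ hy))]
    · have hx0 := hz x List.mem_cons_self (by simp [hp])
      simp [hp, hx0, ih (fun y hy => hz y (List.mem_cons_of_mem _ hy))]

-- a sum splits along a boolean predicate
theorem pv_sum_split {α : Type} (l : List α) (p : α → Bool) (h : α → Int) :
    (l.map h).sum = ((l.filter p).map h).sum + ((l.filter (fun x => !p x)).map h).sum := by
  induction l with
  | nil => simp
  | cons x l ih =>
    by_cases hp : p x
    · simp [hp, ih]; ring
    · simp [hp, ih]; ring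

theorem squared_euclidean_eq (a b : List (String × Int))
    (ha : (a.map Prod.fst).Nodup) (hb : (b.map Prod.fst).Nodup) :
    squared_euclidean a b = squared_euclidean_alt a b := by
  have hka : (PySem.Dict.mk a).keys = a.map Prod.fst := rfl
  have hkb : (PySem.Dict.mk b).keys = b.map Prod.fst := rfl
  have hnka : (PySem.Dict.mk a).keys.Nodup := by rw [hka]; exact ha
  have hnkb : (PySem.Dict.mk b).keys.Nodup := by rw [hkb]; exact hb
  -- the key list A's loop runs over
  have hkeys : PySem.Set.union (PySem.Set.ofList (PySem.Dict.mk a).keys)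
        (PySem.Set.ofList (PySem.Dict.mk b).keys)
      = a.map Prod.fst
        ++ (b.map Prod.fst).filter (fun y => !((a.map Prod.fst).contains y)) := by
    show PySem.Set.update (PySem.Set.ofList (PySem.Dict.mk a).keys)
        (PySem.Set.ofList (PySem.Dict.mk b).keys) = _
    rw [PySem.Set.update_eq_append_filter, hka, hkb,
      PySem.Set.ofList_eq_self_of_nodup _ ha, PySem.Set.ofList_eq_self_of_nodup _ hb,
      PySem.Set.ofList_eq_self_of_nodup _ hb]
    rfl
  have hfa0 : ∀ k, ((a.map Prod.fst).contains k) = false → (PySem.Dict.mk a).getD k 0 = 0 := by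
    intro k hk
    refine PySem.Dict.getD_of_not_contains _ 0 ?_
    rw [PySem.Dict.contains_eq_decide_mem_keys, hka]
    simpa using hk
  have hfb0 : ∀ k, ((b.map Prod.fst).contains k) = false → (PySem.Dict.mk b).getD k 0 = 0 := by
    intro k hk
    refine PySem.Dict.getD_of_not_contains _ 0 ?_
    rw [PySem.Dict.contains_eq_decide_mem_keys, hkb]
    simpa using hk
  have hva : (PySem.Dict.mk a).values
      = (a.map Prod.fst).map (fun k => (PySem.Dict.mk a).getD k 0) := by
    have := PySem.Dict.values_eq_map_keys (PySem.Dict.mk a) hnka 0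
    rwa [hka] at this
  have hvb : (PySem.Dict.mk b).values
      = (b.map Prod.fst).map (fun k => (PySem.Dict.mk b).getD k 0) := by
    have := PySem.Dict.values_eq_map_keys (PySem.Dict.mk b) hnkb 0
    rwa [hkb] at this
  -- both sides as sums over key lists
  unfold squared_euclidean squared_euclidean_alt
  simp only []
  rw [hkeys, pv_loopA, zero_add, List.map_append, List.sum_append]
  rw [pv_foldl_if_add, zero_add,
    PySem.List.foldl_add, PySem.List.foldl_add, zero_add, zero_add]
  rw [hva, hvb]
  simp only [List.map_map, Function.comp_def]
  -- expand the squared differences over a's items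
  have hsq : (List.map (fun x : String × Int =>
        ((PySem.Dict.mk a).getD x.1 0 - (PySem.Dict.mk b).getD x.1 0) ^ 2) a).sum
      = (List.map (fun x : String × Int =>
            (PySem.Dict.mk a).getD x.1 0 * (PySem.Dict.mk a).getD x.1 0) a).sum
        - 2 * (List.map (fun x : String × Int =>
            (PySem.Dict.mk a).getD x.1 0 * (PySem.Dict.mk b).getD x.1 0) a).sum
        + (List.map (fun x : String × Int =>
            (PySem.Dict.mk b).getD x.1 0 * (PySem.Dict.mk b).getD x.1 0) a).sum :=
    pv_sum_sq_sub a _ _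
  rw [hsq]
  -- the guarded dot product, unfiltered and re-indexed
  have hdot : (List.map (fun p : String × Int => p.2 * (PySem.Dict.mk b).getD p.1 0)
        (a.filter (fun p => (PySem.Dict.mk b).contains p.1))).sum
      = (List.map (fun x : String × Int =>
            (PySem.Dict.mk a).getD x.1 0 * (PySem.Dict.mk b).getD x.1 0) a).sum := by
    rw [← pv_sum_filter_of_zero a (fun p => (PySem.Dict.mk b).contains p.1)
      (fun p => p.2 * (PySem.Dict.mk b).getD p.1 0)
      (fun p _ hc => by
        change p.2 * (PySem.Dict.mk b).getD p.1 0 = 0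
        rw [PySem.Dict.getD_of_not_contains _ 0 hc]; ring)]
    refine congrArg List.sum (List.map_congr_left ?_)
    intro p hp
    have hpa : (PySem.Dict.mk a).getD p.1 0 = p.2 :=
      PySem.Dict.getD_of_mem_items _ (by simpa using hp) hnka 0
    rw [hpa]
  rw [hdot]
  -- on b's keys outside a the squared difference is just fb^2
  have hcong : ((b.map Prod.fst).filter (fun y => !((a.map Prod.fst).contains y))).map
        (fun k => ((PySem.Dict.mk a).getD k 0 - (PySem.Dict.mk b).getD k 0) ^ 2)
      = ((b.map Prod.fst).filter (fun y => !((a.map Prod.fst).contains y))).map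
          (fun k => (PySem.Dict.mk b).getD k 0 * (PySem.Dict.mk b).getD k 0) := by
    refine List.map_congr_left ?_
    intro k hk
    have hk0 : (PySem.Dict.mk a).getD k 0 = 0 :=
      hfa0 k (by simpa using (List.of_mem_filter hk))
    rw [hk0]; ring
  rw [hcong]
  -- re-index the two fb^2 sums over the key lists
  have ha2 : (List.map (fun x : String × Int =>
        (PySem.Dict.mk b).getD x.1 0 * (PySem.Dict.mk b).getD x.1 0) a).sum
      = (List.map (fun k => (PySem.Dict.mk b).getD k 0 * (PySem.Dict.mk b).getD k 0)
          (a.map Prod.fst)).sum := by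
    rw [List.map_map]; rfl
  have hb2 : (List.map (fun x : String × Int =>
        (PySem.Dict.mk b).getD x.1 0 * (PySem.Dict.mk b).getD x.1 0) b).sum
      = (List.map (fun k => (PySem.Dict.mk b).getD k 0 * (PySem.Dict.mk b).getD k 0)
          (b.map Prod.fst)).sum := by
    rw [List.map_map]; rfl
  rw [ha2, hb2]
  -- split the sum over b's keys along membership in a's keys
  have hsplit := pv_sum_split (b.map Prod.fst)
    (fun y => (a.map Prod.fst).contains y)
    (fun k => (PySem.Dict.mk b).getD k 0 * (PySem.Dict.mk b).getD k 0)
  -- and identify the common part with the fb^2 sum over a's keys (a permutation of key lists)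
  have hcommon : ((a.map Prod.fst).map
        (fun k => (PySem.Dict.mk b).getD k 0 * (PySem.Dict.mk b).getD k 0)).sum
      = (((b.map Prod.fst).filter (fun y => (a.map Prod.fst).contains y)).map
          (fun k => (PySem.Dict.mk b).getD k 0 * (PySem.Dict.mk b).getD k 0)).sum := by
    rw [pv_sum_filter_of_zero (a.map Prod.fst) (fun y => (b.map Prod.fst).contains y)
      (fun k => (PySem.Dict.mk b).getD k 0 * (PySem.Dict.mk b).getD k 0)
      (fun k _ hk => by
        change (PySem.Dict.mk b).getD k 0 * (PySem.Dict.mk b).getD k 0 = 0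
        rw [hfb0 k hk]; ring)]
    have hperm : ((a.map Prod.fst).filter (fun y => (b.map Prod.fst).contains y)).Perm
        ((b.map Prod.fst).filter (fun y => (a.map Prod.fst).contains y)) := by
      refine (List.perm_ext_iff_of_nodup (ha.filter _) (hb.filter _)).mpr ?_
      intro x
      simp only [List.mem_filter]
      constructor
      · rintro ⟨h1, h2⟩; exact ⟨by simpa using h2, by simpa using h1⟩
      · rintro ⟨h1, h2⟩; exact ⟨by simpa using h2, by simpa using h1⟩
    exact (hperm.map _).sum_eq
  rw [hsplit, hcommon]
  ring

-- ===== VERDICT (by name: the statement is the Claim_ definition above) =====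
theorem squared_euclidean_spec : Claim_equal_squared_euclidean := by
  intro a b _ hpre
  exact squared_euclidean_eq a b hpre.1 hpre.2
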